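-- pv_equiv track=rewrite | github.com/officiallywily/spacetime-crawler4py | scraper.py | is_valid_host
-- ===== SOURCE A (Python) =====
-- _ALLOWED_SUBDOMAINS = (
--     ".ics.uci.edu",
--     ".cs.uci.edu",
--     ".informatics.uci.edu",
--     ".stat.uci.edu",
-- )
--
-- _ALLOWED_SUBDOMAINS_BUT_NO_PERIOD_IN_THE_BEGINNING = (
--     "ics.uci.edu",
--     "cs.uci.edu",
--     "informatics.uci.edu",
--     "stat.uci.edu",
-- )
--
-- def is_valid_host(host: str) -> bool:
--     if not host:
--         return False
--     host = host.lower()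
--     if host in _ALLOWED_SUBDOMAINS_BUT_NO_PERIOD_IN_THE_BEGINNING:
--         return True
--     for subdomain in _ALLOWED_SUBDOMAINS:
--         if host.endswith(subdomain):
--             return True
--
--     return False
-- ===== SOURCE B (Python) =====
-- _TLD = ".uci.edu"
-- _ALLOWED_LABELS = {"ics", "cs", "informatics", "stat"}
--
-- def is_valid_host(host: str) -> bool:
--     h = host.lower()
--     if not h.endswith(_TLD):
--         return False
--     label = ""
--     for ch in h[:-len(_TLD)]:
--         label = "" if ch == "." else label + ch
--     return label in _ALLOWED_LABELS
-- ===== Notes on version B (the rewrite author's own statement) =====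
-- stated objective: simpler
-- what changed: A tests exact membership in a 4-tuple and then loops endswith over four dotted suffixes; B does one endswith('.uci.edu') check and a single scan of the stem that tracks the current dot-separated label, then one set lookup.
import Mathlib
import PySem

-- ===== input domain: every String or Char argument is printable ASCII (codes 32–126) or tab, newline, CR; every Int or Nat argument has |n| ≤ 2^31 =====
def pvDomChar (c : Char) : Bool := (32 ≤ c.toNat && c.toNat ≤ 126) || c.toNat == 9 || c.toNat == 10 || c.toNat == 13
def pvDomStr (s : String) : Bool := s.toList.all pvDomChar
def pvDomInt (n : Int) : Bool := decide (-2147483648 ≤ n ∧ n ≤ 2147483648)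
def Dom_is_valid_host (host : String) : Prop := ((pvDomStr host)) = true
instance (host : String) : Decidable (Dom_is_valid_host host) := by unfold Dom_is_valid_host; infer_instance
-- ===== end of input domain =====

-- B replaces A's exact-membership tuple plus endswith loop by one endswith('.uci.edu')
-- check and a single scan that tracks the current dot-separated label (objective: simpler).

-- ===== PORT A =====
def is_valid_host (host : String) : Bool :=
  if host.toList.isEmpty then false
  else
    let h := PySem.Chars.lower host.toList
    if ["ics.uci.edu".toList, "cs.uci.edu".toList,
        "informatics.uci.edu".toList, "stat.uci.edu".toList].contains h then true
    else
      -- for-loop with early 'return True' over the four dotted suffixes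
      [".ics.uci.edu".toList, ".cs.uci.edu".toList,
       ".informatics.uci.edu".toList, ".stat.uci.edu".toList].any
        (fun sub => PySem.Chars.endswith h sub)

-- ===== PORT B =====
def is_valid_host_alt (host : String) : Bool :=
  let h := PySem.Chars.lower host.toList
  if !PySem.Chars.endswith h ".uci.edu".toList then false
  else
    -- 'label' scan over h[:-len(_TLD)] (len(_TLD) = 8)
    let label := (PySem.List.slice h none (some (-8))).foldl
      (fun acc ch => if ch = '.' then ([] : List Char) else acc ++ [ch]) ([] : List Char)
    PySem.Set.contains
      (PySem.Set.ofList ["ics".toList, "cs".toList, "informatics".toList, "stat".toList]) label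

-- ===== PRECONDITION & SPEC =====
def Spec_is_valid_host (host : String) (out : Bool) : Prop := out = is_valid_host_alt host
instance (host : String) (out : Bool) : Decidable (Spec_is_valid_host host out) := by unfold Spec_is_valid_host; infer_instance

-- ===== CLAIM (what is proved, stated in full; the proofs are below) =====
def Claim_equal_is_valid_host : Prop := ∀ (host : String), Dom_is_valid_host host → Spec_is_valid_host host (is_valid_host host)

-- ===== LEMMAS AND PROOFS =====

-- the label-scan step function of B
def pvScanStep (acc : List Char) (ch : Char) : List Char :=
  if ch = '.' then [] else acc ++ [ch]

lemma pvScan_cases (p : List Char) (acc : List Char) :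
    ('.' ∉ p ∧ p.foldl pvScanStep acc = acc ++ p) ∨
    (∃ q, p = q ++ '.' :: p.foldl pvScanStep acc ∧ '.' ∉ p.foldl pvScanStep acc) := by
  induction p using List.reverseRecOn with
  | nil => left; simp
  | append_singleton xs c ih =>
    rw [List.foldl_append]
    by_cases hc : c = '.'
    · right
      refine ⟨xs, ?_, by simp [List.foldl_cons, pvScanStep, hc]⟩
      simp [List.foldl_cons, pvScanStep, hc]
    · rcases ih with ⟨hnd, he⟩ | ⟨q, hq, hnd⟩
      · left
        constructor
        · intro hm
          rcases List.mem_append.mp hm with h | h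
          · exact hnd h
          · exact hc (List.mem_singleton.mp h).symm
        · simp [List.foldl_cons, pvScanStep, hc, he]
      · right
        refine ⟨q, ?_, ?_⟩
        · simp only [List.foldl_cons, pvScanStep, if_neg hc]
          conv_lhs => rw [hq]
          simp
        · simp only [List.foldl_cons, pvScanStep, if_neg hc]
          intro hm
          rcases List.mem_append.mp hm with h | h
          · exact hnd h
          · exact hc (List.mem_singleton.mp h).symm

-- suffix cancellation on a common right part
lemma pvSuffix_append_right_iff (a b t : List Char) : (a ++ t) <:+ (b ++ t) ↔ a <:+ b := by
  rw [← List.reverse_prefix, List.reverse_append, List.reverse_append,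
      List.prefix_append_right_inj, List.reverse_prefix]

-- a dotted suffix '.'++we inside q ++ '.'::w (w, we dot-free) pins we = w
lemma pvDotSuffix (q w we : List Char) (hw : '.' ∉ w) (hwe : '.' ∉ we) :
    ('.' :: we) <:+ (q ++ '.' :: w) ↔ we = w := by
  constructor
  · intro h
    have hsw : ('.' :: w) <:+ (q ++ '.' :: w) := List.suffix_append _ _
    by_cases hl : ('.' :: we).length ≤ ('.' :: w).length
    · have h2 : ('.' :: we) <:+ ('.' :: w) := List.suffix_of_suffix_length_le h hsw hl
      rcases List.suffix_cons_iff.mp h2 with h3 | h3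
      · injection h3 with _ h4
      · exact absurd (h3.subset List.mem_cons_self) hw
    · have h2 : ('.' :: w) <:+ ('.' :: we) :=
        List.suffix_of_suffix_length_le hsw h (by omega)
      rcases List.suffix_cons_iff.mp h2 with h3 | h3
      · injection h3 with _ h4; exact h4.symm
      · exact absurd (h3.subset List.mem_cons_self) hwe
  · intro h; subst h; exact List.suffix_append _ _

-- the four-element set literal of B evaluates to its element list
lemma pvSetEval : PySem.Set.ofList ["ics".toList, "cs".toList, "informatics".toList, "stat".toList]
    = ["ics".toList, "cs".toList, "informatics".toList, "stat".toList] := by decide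

-- decompositions of the eight literals around the common ".uci.edu" tail
lemma pvLit1 : ("ics.uci.edu".toList : List Char) = "ics".toList ++ ".uci.edu".toList := by decide
lemma pvLit2 : ("cs.uci.edu".toList : List Char) = "cs".toList ++ ".uci.edu".toList := by decide
lemma pvLit3 : ("informatics.uci.edu".toList : List Char) = "informatics".toList ++ ".uci.edu".toList := by decide
lemma pvLit4 : ("stat.uci.edu".toList : List Char) = "stat".toList ++ ".uci.edu".toList := by decide
lemma pvDot1 : (".ics.uci.edu".toList : List Char) = ('.' :: "ics".toList) ++ ".uci.edu".toList := by decide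
lemma pvDot2 : (".cs.uci.edu".toList : List Char) = ('.' :: "cs".toList) ++ ".uci.edu".toList := by decide
lemma pvDot3 : (".informatics.uci.edu".toList : List Char) = ('.' :: "informatics".toList) ++ ".uci.edu".toList := by decide
lemma pvDot4 : (".stat.uci.edu".toList : List Char) = ('.' :: "stat".toList) ++ ".uci.edu".toList := by decide

-- main equivalence on the stem p, once h = p ++ ".uci.edu"
lemma pvKey (p : List Char) :
    (["ics.uci.edu".toList, "cs.uci.edu".toList,
      "informatics.uci.edu".toList, "stat.uci.edu".toList].contains (p ++ ".uci.edu".toList) ||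
     [".ics.uci.edu".toList, ".cs.uci.edu".toList,
      ".informatics.uci.edu".toList, ".stat.uci.edu".toList].any
       (fun sub => PySem.Chars.endswith (p ++ ".uci.edu".toList) sub))
    =
    PySem.Set.contains
      (PySem.Set.ofList ["ics".toList, "cs".toList, "informatics".toList, "stat".toList])
      (p.foldl pvScanStep []) := by
  rw [pvSetEval]
  apply Bool.eq_iff_iff.mpr
  simp only [PySem.Set.contains, Bool.or_eq_true, List.contains_iff_mem, List.any_eq_true,
    List.mem_cons, List.not_mem_nil, or_false]
  have hE : ∀ w : List Char, (p ++ ".uci.edu".toList = w ++ ".uci.edu".toList) ↔ p = w :=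
    fun w => List.append_left_inj _
  have hD : ∀ w : List Char,
      PySem.Chars.endswith (p ++ ".uci.edu".toList) (('.' :: w) ++ ".uci.edu".toList) = true
      ↔ ('.' :: w) <:+ p := by
    intro w
    rw [PySem.Chars.endswith_iff, pvSuffix_append_right_iff]
  rcases pvScan_cases p [] with ⟨hnd, he⟩ | ⟨q, hq, hnd⟩
  · rw [he]; simp only [List.nil_append]
    constructor
    · rintro (hm | ⟨sub, hsub, hend⟩)
      · rcases hm with h | h | h | h
        · exact Or.inl ((hE "ics".toList).mp (by rw [h, pvLit1]))
        · exact Or.inr (Or.inl ((hE "cs".toList).mp (by rw [h, pvLit2])))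
        · exact Or.inr (Or.inr (Or.inl ((hE "informatics".toList).mp (by rw [h, pvLit3]))))
        · exact Or.inr (Or.inr (Or.inr ((hE "stat".toList).mp (by rw [h, pvLit4]))))
      · -- a dotted suffix would put a '.' into the dot-free p
        exfalso
        rcases hsub with h | h | h | h <;> subst h
        · rw [pvDot1] at hend
          exact hnd (((hD "ics".toList).mp hend).subset List.mem_cons_self)
        · rw [pvDot2] at hend
          exact hnd (((hD "cs".toList).mp hend).subset List.mem_cons_self)
        · rw [pvDot3] at hend
          exact hnd (((hD "informatics".toList).mp hend).subset List.mem_cons_self)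
        · rw [pvDot4] at hend
          exact hnd (((hD "stat".toList).mp hend).subset List.mem_cons_self)
    · intro hm
      left
      rcases hm with h | h | h | h <;> subst h
      · left; exact pvLit1.symm
      · right; left; exact pvLit2.symm
      · right; right; left; exact pvLit3.symm
      · right; right; right; exact pvLit4.symm
  · set s := p.foldl pvScanStep [] with hs
    constructor
    · rintro (hm | ⟨sub, hsub, hend⟩)
      · -- p contains a '.', the exact candidates do not
        exfalso
        have hdot : '.' ∈ p := by rw [hq]; simp
        rcases hm with h | h | h | h
        · rw [(hE "ics".toList).mp (by rw [h, pvLit1])] at hdot; revert hdot; decide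
        · rw [(hE "cs".toList).mp (by rw [h, pvLit2])] at hdot; revert hdot; decide
        · rw [(hE "informatics".toList).mp (by rw [h, pvLit3])] at hdot; revert hdot; decide
        · rw [(hE "stat".toList).mp (by rw [h, pvLit4])] at hdot; revert hdot; decide
      · rcases hsub with h | h | h | h <;> subst h
        · rw [pvDot1] at hend
          have h2 := (hD "ics".toList).mp hend; rw [hq] at h2
          exact Or.inl ((pvDotSuffix q s _ hnd (by decide)).mp h2).symm
        · rw [pvDot2] at hend
          have h2 := (hD "cs".toList).mp hend; rw [hq] at h2
          exact Or.inr (Or.inl ((pvDotSuffix q s _ hnd (by decide)).mp h2).symm)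
        · rw [pvDot3] at hend
          have h2 := (hD "informatics".toList).mp hend; rw [hq] at h2
          exact Or.inr (Or.inr (Or.inl ((pvDotSuffix q s _ hnd (by decide)).mp h2).symm))
        · rw [pvDot4] at hend
          have h2 := (hD "stat".toList).mp hend; rw [hq] at h2
          exact Or.inr (Or.inr (Or.inr ((pvDotSuffix q s _ hnd (by decide)).mp h2).symm))
    · intro hm
      right
      rcases hm with h | h | h | h
      · refine ⟨".ics.uci.edu".toList, Or.inl rfl, ?_⟩
        rw [pvDot1]
        exact (hD _).mpr (by rw [hq, ← h]; exact (pvDotSuffix q s s hnd hnd).mpr rfl)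
      · refine ⟨".cs.uci.edu".toList, Or.inr (Or.inl rfl), ?_⟩
        rw [pvDot2]
        exact (hD _).mpr (by rw [hq, ← h]; exact (pvDotSuffix q s s hnd hnd).mpr rfl)
      · refine ⟨".informatics.uci.edu".toList, Or.inr (Or.inr (Or.inl rfl)), ?_⟩
        rw [pvDot3]
        exact (hD _).mpr (by rw [hq, ← h]; exact (pvDotSuffix q s s hnd hnd).mpr rfl)
      · refine ⟨".stat.uci.edu".toList, Or.inr (Or.inr (Or.inr rfl)), ?_⟩
        rw [pvDot4]
        exact (hD _).mpr (by rw [hq, ← h]; exact (pvDotSuffix q s s hnd hnd).mpr rfl)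

-- proof-side restatements of the two bodies, with the lowered host as a parameter
def pvA (h : List Char) : Bool :=
  if ["ics.uci.edu".toList, "cs.uci.edu".toList,
      "informatics.uci.edu".toList, "stat.uci.edu".toList].contains h then true
  else
    [".ics.uci.edu".toList, ".cs.uci.edu".toList,
     ".informatics.uci.edu".toList, ".stat.uci.edu".toList].any
      (fun sub => PySem.Chars.endswith h sub)

def pvB (h : List Char) : Bool :=
  if !PySem.Chars.endswith h ".uci.edu".toList then false
  else
    PySem.Set.contains
      (PySem.Set.ofList ["ics".toList, "cs".toList, "informatics".toList, "stat".toList])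
      ((PySem.List.slice h none (some (-8))).foldl pvScanStep [])

lemma pvIfTrueLeft (a b : Bool) : (if a = true then true else b) = (a || b) := by
  cases a <;> simp

lemma pvAB (h : List Char) : pvA h = pvB h := by
  unfold pvA pvB
  by_cases hs : PySem.Chars.endswith h ".uci.edu".toList
  · rcases (PySem.Chars.endswith_iff _ _).mp hs with ⟨p, hp⟩
    rw [hs]
    simp only [Bool.not_true]
    rw [pvIfTrueLeft, if_neg (by decide : ¬ (false = true))]
    have hT : (".uci.edu".toList : List Char).length = 8 := by decide
    have hlen : h.length = p.length + 8 := by rw [← hp, List.length_append, hT]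
    have hslice : PySem.List.slice h none (some (-8)) = p := by
      rw [PySem.List.slice_to_neg_ofNat h 8 (by omega), hlen, Nat.add_sub_cancel,
          ← hp, List.take_left]
    rw [hslice, ← hp, pvKey p]
  · have hsf : PySem.Chars.endswith h ".uci.edu".toList = false := Bool.eq_false_iff.mpr hs
    have hEfalse : (["ics.uci.edu".toList, "cs.uci.edu".toList,
        "informatics.uci.edu".toList, "stat.uci.edu".toList].contains h) = false := by
      rw [Bool.eq_false_iff]
      intro hc
      have hm := List.contains_iff_mem.mp hc
      simp only [List.mem_cons, List.not_mem_nil, or_false] at hm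
      apply hs
      rw [PySem.Chars.endswith_iff]
      rcases hm with h1 | h1 | h1 | h1 <;> rw [h1] <;> decide
    have hDfalse : ([".ics.uci.edu".toList, ".cs.uci.edu".toList,
        ".informatics.uci.edu".toList, ".stat.uci.edu".toList].any
        (fun sub => PySem.Chars.endswith h sub)) = false := by
      rw [Bool.eq_false_iff]
      intro hc
      rcases List.any_eq_true.mp hc with ⟨sub, hsub, hend⟩
      have hsfx : sub <:+ h := (PySem.Chars.endswith_iff _ _).mp hend
      simp only [List.mem_cons, List.not_mem_nil, or_false] at hsub
      apply hs
      rw [PySem.Chars.endswith_iff]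
      rcases hsub with h1 | h1 | h1 | h1 <;> subst h1 <;>
        exact List.IsSuffix.trans (by decide) hsfx
    rw [hEfalse, hsf, if_neg (by decide : ¬ (false = true)), if_pos (by decide : (!false) = true)]
    exact hDfalse

-- ===== VERDICT (by name: the statement is the Claim_ definition above) =====
theorem is_valid_host_spec : Claim_equal_is_valid_host := by
  intro host _
  show is_valid_host host = is_valid_host_alt host
  show (if host.toList.isEmpty then false else pvA (PySem.Chars.lower host.toList))
      = pvB (PySem.Chars.lower host.toList)
  by_cases he : host.toList.isEmpty
  · rw [List.isEmpty_iff.mp he]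
    decide
  · rw [if_neg he, pvAB]
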